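-- pv_equiv track=rewrite | github.com/thiagobelopasa/AuraBackTest | backend/services/ea_instrumenter.py | _inject_after_header
-- ===== SOURCE A (Python) =====
-- def _inject_after_header(source: str, block: str) -> str:
--     """Insere `block` após o último #property/#include inicial do arquivo.
--
--     Isso preserva metadados (`#property copyright`, `#property version`, etc)
--     que o MetaEditor usa para exibir o EA no Navigator.
--     """
--     lines = source.splitlines(keepends=True)
--     last_header_idx = -1
--     for i, line in enumerate(lines):
--         stripped = line.lstrip()
--         if stripped.startswith("#property") or stripped.startswith("#include") or stripped.startswith("#import"):
--             last_header_idx = i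
--         elif stripped.startswith("//") or stripped.startswith("/*") or stripped.strip() == "":
--             # comentário ou linha vazia — aceita
--             continue
--         else:
--             # primeira linha de código efetivo — para
--             break
--     insert_at = last_header_idx + 1 if last_header_idx >= 0 else 0
--     return "".join(lines[:insert_at]) + "\n" + block + "\n" + "".join(lines[insert_at:])
-- ===== SOURCE B (Python) =====
-- def _inject_after_header(source: str, block: str) -> str:
--     """Insere `block` apos o ultimo #property/#include/#import inicial."""
--     lines = source.splitlines(keepends=True)
--
--     def _is_directive(line):
--         s = line.lstrip()
--         return s.startswith("#property") or s.startswith("#include") or s.startswith("#import")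
--
--     def _is_header(line):
--         s = line.lstrip()
--         return (_is_directive(line) or s.startswith("//") or s.startswith("/*")
--                 or s.strip() == "")
--
--     # pass 1: boundary of the leading header region
--     n = 0
--     while n < len(lines) and _is_header(lines[n]):
--         n += 1
--
--     # pass 2: last directive inside the header region, scanned backwards
--     insert_at = 0
--     idx = n - 1
--     for line in reversed(lines[:n]):
--         if _is_directive(line):
--             insert_at = idx + 1
--             break
--         idx -= 1
--
--     return "".join(lines[:insert_at]) + "\n" + block + "\n" + "".join(lines[insert_at:])
-- ===== Notes on version B (the rewrite author's own statement) =====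
-- stated objective: alternative
-- what changed: A's single accumulating loop with an in-loop break is replaced by two separate passes: a boundary pass that finds the end of the leading header region, then a backwards scan over that prefix for the last directive line.
import Mathlib
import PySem

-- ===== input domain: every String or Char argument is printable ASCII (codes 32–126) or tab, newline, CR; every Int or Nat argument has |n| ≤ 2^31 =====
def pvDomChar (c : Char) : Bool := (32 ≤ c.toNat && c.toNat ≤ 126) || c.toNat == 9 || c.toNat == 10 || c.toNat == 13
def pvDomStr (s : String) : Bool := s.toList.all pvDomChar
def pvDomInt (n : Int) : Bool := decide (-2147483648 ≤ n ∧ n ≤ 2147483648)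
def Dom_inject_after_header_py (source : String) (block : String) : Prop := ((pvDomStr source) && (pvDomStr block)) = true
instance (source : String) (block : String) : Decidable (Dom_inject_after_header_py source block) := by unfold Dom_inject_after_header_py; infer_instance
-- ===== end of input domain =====

-- B replaces A's single accumulating loop-with-break by a boundary pass plus a backwards scan; same cost, different decomposition.

-- shared helper: source.splitlines(keepends=True); exact on the domain (the only line breaks
-- in Dom are '\n', '\r' and '\r\n'; Python's extra break characters \v \f \x1c-\x1e \x85 … are outside Dom)
def pvSplitKeep : List Char → List (List Char)
  | [] => []
  | '\r' :: '\n' :: rest => ['\r', '\n'] :: pvSplitKeep rest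
  | '\r' :: rest => ['\r'] :: pvSplitKeep rest
  | '\n' :: rest => ['\n'] :: pvSplitKeep rest
  | c :: rest =>
    match pvSplitKeep rest with
    | [] => [[c]]
    | l :: ls => (c :: l) :: ls

-- ===== PORT A =====
-- the for-loop over enumerate(lines) with `break`: state (i, last_header_idx)
def pvALoop : List (List Char) → Int → Int → Int
  | [], _, last => last
  | l :: rest, i, last =>
    let s := PySem.Chars.lstrip l
    if PySem.Chars.startswith s "#property".toList || PySem.Chars.startswith s "#include".toList
        || PySem.Chars.startswith s "#import".toList then
      pvALoop rest (i + 1) i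
    else if PySem.Chars.startswith s "//".toList || PySem.Chars.startswith s "/*".toList
        || (PySem.Chars.strip s == []) then
      pvALoop rest (i + 1) last
    else
      last

def inject_after_header_py (source : String) (block : String) : String :=
  let lines := pvSplitKeep source.toList
  let last_header_idx := pvALoop lines 0 (-1)
  let insert_at : Int := if last_header_idx ≥ 0 then last_header_idx + 1 else 0
  String.ofList (PySem.Chars.join [] (PySem.List.slice lines none (some insert_at))
    ++ '\n' :: block.toList ++ '\n'
    :: PySem.Chars.join [] (PySem.List.slice lines (some insert_at) none))

-- ===== PORT B =====
def pvIsDir (l : List Char) : Bool :=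
  let s := PySem.Chars.lstrip l
  PySem.Chars.startswith s "#property".toList || PySem.Chars.startswith s "#include".toList
    || PySem.Chars.startswith s "#import".toList

def pvIsHeader (l : List Char) : Bool :=
  let s := PySem.Chars.lstrip l
  pvIsDir l || PySem.Chars.startswith s "//".toList || PySem.Chars.startswith s "/*".toList
    || (PySem.Chars.strip s == [])

-- pass 1: `while n < len(lines) and _is_header(lines[n]): n += 1`
def pvBCount : List (List Char) → Nat
  | [] => 0
  | l :: rest => if pvIsHeader l then pvBCount rest + 1 else 0

-- pass 2: `for line in reversed(lines[:n])` with downward counter idx and break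
def pvBFind : List (List Char) → Int → Int
  | [], _ => 0
  | l :: rest, idx => if pvIsDir l then idx + 1 else pvBFind rest (idx - 1)

def inject_after_header_py_alt (source : String) (block : String) : String :=
  let lines := pvSplitKeep source.toList
  let n := pvBCount lines
  let insert_at : Int := pvBFind (lines.take n).reverse ((n : Int) - 1)
  String.ofList (PySem.Chars.join [] (PySem.List.slice lines none (some insert_at))
    ++ '\n' :: block.toList ++ '\n'
    :: PySem.Chars.join [] (PySem.List.slice lines (some insert_at) none))

-- ===== PRECONDITION & SPEC =====
def Spec_inject_after_header_py (source : String) (block : String) (out : String) : Prop := out = inject_after_header_py_alt source block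
instance (source : String) (block : String) (out : String) : Decidable (Spec_inject_after_header_py source block out) := by unfold Spec_inject_after_header_py; infer_instance

-- ===== CLAIM (what is proved, stated in full; the proofs are below) =====
def Claim_equal_inject_after_header_py : Prop := ∀ (source : String) (block : String), Dom_inject_after_header_py source block → Spec_inject_after_header_py source block (inject_after_header_py source block)

-- ===== LEMMAS AND PROOFS =====

-- proof-side characterisation: index of the last directive line inside the leading header region
def pvDlast : List (List Char) → Option Nat
  | [] => none
  | l :: rest =>
    if pvIsHeader l then
      match pvDlast rest with
      | some k => some (k + 1)
      | none => if pvIsDir l then some 0 else none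
    else none

theorem pvALoop_eq (lines : List (List Char)) : ∀ (i last : Int),
    pvALoop lines i last = (match pvDlast lines with | some k => i + k | none => last) := by
  induction lines with
  | nil => intro i last; simp [pvALoop, pvDlast]
  | cons l rest ih =>
    intro i last
    by_cases hd : pvIsDir l
    · have hh : pvIsHeader l = true := by simp [pvIsHeader, hd]
      simp only [pvALoop, pvDlast, hh, if_pos]
      rw [if_pos (by simpa [pvIsDir] using hd)]
      rw [ih (i + 1) i]
      cases hk : pvDlast rest with
      | some k => push_cast; ring_nf
      | none => simp [hd]
    · have hd' : ¬ (PySem.Chars.startswith (PySem.Chars.lstrip l) "#property".toList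
          || PySem.Chars.startswith (PySem.Chars.lstrip l) "#include".toList
          || PySem.Chars.startswith (PySem.Chars.lstrip l) "#import".toList) = true := by
        simpa [pvIsDir] using hd
      by_cases hs : (PySem.Chars.startswith (PySem.Chars.lstrip l) "//".toList
          || PySem.Chars.startswith (PySem.Chars.lstrip l) "/*".toList
          || (PySem.Chars.strip (PySem.Chars.lstrip l) == [])) = true
      · have hh : pvIsHeader l = true := by
          simp only [pvIsHeader, Bool.or_eq_true, beq_iff_eq] at hs ⊢
          tauto
        simp only [pvALoop, pvDlast, hh, if_pos]
        rw [if_neg hd', if_pos hs, ih (i + 1) last]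
        cases hk : pvDlast rest with
        | some k => push_cast; ring_nf
        | none => simp [hd]
      · have hh : pvIsHeader l = false := by
          have hdf : pvIsDir l = false := by simpa using hd
          simp only [Bool.or_eq_true, not_or, Bool.not_eq_true] at hs
          obtain ⟨⟨h1, h2⟩, h3⟩ := hs
          simp at h1 h2 h3
          simp [pvIsHeader, hdf, h1, h2, h3]
        simp only [pvALoop, pvDlast, hh]
        rw [if_neg hd', if_neg hs]
        simp

theorem pvBFind_eq (rs : List (List Char)) : ∀ (idx : Int),
    pvBFind rs idx = (match rs.findIdx? pvIsDir with | some j => idx + 1 - j | none => 0) := by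
  induction rs with
  | nil => intro idx; simp [pvBFind]
  | cons l rest ih =>
    intro idx
    by_cases hd : pvIsDir l
    · simp [pvBFind, hd, List.findIdx?_cons]
    · simp only [pvBFind, hd, Bool.false_eq_true, if_false, List.findIdx?_cons, ih (idx - 1)]
      cases hk : rest.findIdx? pvIsDir with
      | some j => simp
      | none => simp

theorem pvBCount_eq (lines : List (List Char)) :
    pvBCount lines = (lines.takeWhile pvIsHeader).length := by
  induction lines with
  | nil => simp [pvBCount]
  | cons l rest ih =>
    by_cases hh : pvIsHeader l
    · simp [pvBCount, hh, List.takeWhile_cons, ih]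
    · simp [pvBCount, hh, List.takeWhile_cons]

theorem pvTake_count_eq (lines : List (List Char)) :
    lines.take (pvBCount lines) = lines.takeWhile pvIsHeader := by
  induction lines with
  | nil => simp [pvBCount]
  | cons l rest ih =>
    by_cases hh : pvIsHeader l
    · simp [pvBCount, hh, List.takeWhile_cons, ih]
    · simp [pvBCount, hh, List.takeWhile_cons]

-- the backwards scan over the header prefix computes exactly pvDlast + 1 (or 0)
theorem pvBmain (lines : List (List Char)) :
    pvBFind (lines.takeWhile pvIsHeader).reverse (((lines.takeWhile pvIsHeader).length : Int) - 1)
      = (match pvDlast lines with | some k => (k : Int) + 1 | none => 0) := by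
  induction lines with
  | nil => simp [pvBFind, pvDlast]
  | cons l rest ih =>
    by_cases hh : pvIsHeader l
    · simp only [List.takeWhile_cons, hh, if_pos, List.reverse_cons, List.length_cons]
      rw [pvBFind_eq, List.findIdx?_append]
      rw [pvBFind_eq] at ih
      cases hj : (rest.takeWhile pvIsHeader).reverse.findIdx? pvIsDir with
      | some j =>
        have hjlen : j < (rest.takeWhile pvIsHeader).length := by
          have := (List.findIdx?_eq_some_iff_findIdx_eq.mp hj).1
          simpa using this
        cases hk : pvDlast rest with
        | some k =>
          have h0 := ih
          simp [hj, hk] at h0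
          clear ih
          first
            | (simp [pvDlast, hh, hk]; done)
            | (simp [pvDlast, hh, hk]; omega)
            | (simp [pvDlast, hh, hk]; push_cast; omega)
            | (simp [pvDlast, hh, hk]; push_cast; linarith [h0])
        | none =>
          exfalso
          have h0 := ih
          simp [hj, hk] at h0
          clear ih
          first
            | omega
            | (push_cast at h0; omega)
            | (have hj' : (j : Int) < ((rest.takeWhile pvIsHeader).length : Int) := by exact_mod_cast hjlen
               linarith [h0, hj'])
      | none =>
        have hnone : pvDlast rest = none := by
          cases hk : pvDlast rest with
          | some k =>
            exfalso
            have h0 := ih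
            simp [hj, hk] at h0
            clear ih
            first
              | omega
              | exact (by positivity : (0 : Int) < (k : Int) + 1).ne' h0.symm
          | none => rfl
        by_cases hd : pvIsDir l
        · first
            | (simp [pvDlast, hh, hnone, List.findIdx?_cons, hd]; done)
            | (simp [pvDlast, hh, hnone, List.findIdx?_cons, hd]; omega)
            | (simp [pvDlast, hh, hnone, List.findIdx?_cons, hd]; push_cast; omega)
        · simp [pvDlast, hh, hnone, List.findIdx?_cons, hd]
    · simp only [List.takeWhile_cons, hh]
      simp [pvBFind, pvDlast, hh]

theorem pvALoop_insert (lines : List (List Char)) :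
    (if pvALoop lines 0 (-1) ≥ 0 then pvALoop lines 0 (-1) + 1 else 0)
      = (match pvDlast lines with | some k => (k : Int) + 1 | none => 0) := by
  rw [pvALoop_eq]
  cases hk : pvDlast lines with
  | some k =>
    simp only [hk]
    rw [if_pos (by positivity)]
    ring
  | none =>
    simp only [hk]
    norm_num

-- ===== VERDICT (by name: the statement is the Claim_ definition above) =====
theorem inject_after_header_py_spec : Claim_equal_inject_after_header_py := by
  intro source block _
  unfold Spec_inject_after_header_py inject_after_header_py inject_after_header_py_alt
  simp only
  rw [pvTake_count_eq, pvBCount_eq, pvBmain, pvALoop_insert]
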